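-- pv_equiv track=rewrite | github.com/lorevox-hx/lorevox | server/code/api/policies.py | _looks_emotional
-- ===== SOURCE A (Python) =====
-- def _looks_emotional(text: str) -> bool:
--     cues = [
--         "sad",
--         "hard",
--         "difficult",
--         "upset",
--         "hurt",
--         "cry",
--         "scared",
--         "afraid",
--         "grief",
--         "trauma",
--         "love",
--         "miss",
--     ]
--     return any(c in text for c in cues)
-- ===== SOURCE B (Python) =====
-- CUES = "sad hard difficult upset hurt cry scared afraid grief trauma love miss".split()
--
-- def _looks_emotional(text: str) -> bool:
--     # single pass: at each position, does some cue start here?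
--     for i in range(len(text)):
--         if any(text.startswith(c, i) for c in CUES):
--             return True
--     return False
-- ===== Notes on version B (the rewrite author's own statement) =====
-- stated objective: alternative
-- what changed: Replaces 12 independent substring scans (any(c in text ...)) with one left-to-right scan over the text that at each position checks whether any cue starts there.
import Mathlib
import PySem

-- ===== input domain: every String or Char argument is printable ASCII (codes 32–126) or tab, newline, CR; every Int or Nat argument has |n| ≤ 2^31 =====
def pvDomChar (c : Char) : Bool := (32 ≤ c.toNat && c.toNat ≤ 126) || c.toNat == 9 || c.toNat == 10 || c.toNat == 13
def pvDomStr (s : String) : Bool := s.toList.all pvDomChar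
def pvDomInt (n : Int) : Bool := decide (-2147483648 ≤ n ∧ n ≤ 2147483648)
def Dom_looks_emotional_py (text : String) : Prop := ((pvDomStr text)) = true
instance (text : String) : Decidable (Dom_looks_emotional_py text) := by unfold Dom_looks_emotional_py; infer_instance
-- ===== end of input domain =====

-- B replaces A's 12 separate substring scans by one left-to-right scan of the text
-- that checks at each position whether any cue starts there (objective: alternative).


-- ===== PORT A =====
def looks_emotional_py (text : String) : Bool :=
  let cues : List String :=
    ["sad", "hard", "difficult", "upset", "hurt", "cry",
     "scared", "afraid", "grief", "trauma", "love", "miss"]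
  cues.any (fun c => PySem.Str.isIn c text)

-- ===== PORT B =====
def pvCUES : List String :=
  PySem.Str.split₀ "sad hard difficult upset hurt cry scared afraid grief trauma love miss"

-- the loop "for i in range(len(text)): if any(text.startswith(c, i) ...)" as
-- structural recursion over the suffixes of the text
def pvScan : List Char → Bool
  | [] => false
  | ch :: rest =>
      if pvCUES.any (fun c => PySem.Chars.startswith (ch :: rest) c.toList) then true
      else pvScan rest

def looks_emotional_py_alt (text : String) : Bool := pvScan text.toList

-- ===== PRECONDITION & SPEC =====
def Spec_looks_emotional_py (text : String) (out : Bool) : Prop := out = looks_emotional_py_alt text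
instance (text : String) (out : Bool) : Decidable (Spec_looks_emotional_py text out) := by unfold Spec_looks_emotional_py; infer_instance

-- ===== CLAIM (what is proved, stated in full; the proofs are below) =====
def Claim_equal_looks_emotional_py : Prop := ∀ (text : String), Dom_looks_emotional_py text → Spec_looks_emotional_py text (looks_emotional_py text)

-- ===== LEMMAS AND PROOFS =====

theorem pvScan_iff (s : List Char) :
    pvScan s = true ↔ ∃ c ∈ pvCUES, ∃ j, c.toList <+: s.drop j := by
  induction s with
  | nil =>
      simp only [pvScan, List.drop_nil, List.prefix_nil, exists_const]
      constructor
      · intro h; exact absurd h (by decide)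
      · rintro ⟨c, hc, h⟩
        have h0 : c = "" := by simpa using h
        subst h0
        revert hc
        decide
  | cons ch rest ih =>
      have hsplit : ∀ c : String,
          (∃ j, c.toList <+: (ch :: rest).drop j) ↔
            (c.toList <+: ch :: rest ∨ ∃ j, c.toList <+: rest.drop j) := by
        intro c
        constructor
        · rintro ⟨j, h⟩
          cases j with
          | zero => exact Or.inl h
          | succ j => exact Or.inr ⟨j, h⟩
        · rintro (h | ⟨j, h⟩)
          · exact ⟨0, h⟩
          · exact ⟨j + 1, h⟩
      have hstep : pvScan (ch :: rest)
          = (pvCUES.any (fun c => PySem.Chars.startswith (ch :: rest) c.toList) || pvScan rest) := by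
        cases h : pvCUES.any (fun c => PySem.Chars.startswith (ch :: rest) c.toList) <;>
          simp [pvScan, h]
      rw [hstep]
      simp only [Bool.or_eq_true, List.any_eq_true, PySem.Chars.startswith_iff, ih, hsplit]
      constructor
      · rintro (⟨c, hc, h⟩ | ⟨c, hc, h⟩)
        · exact ⟨c, hc, Or.inl h⟩
        · exact ⟨c, hc, Or.inr h⟩
      · rintro ⟨c, hc, h | h⟩
        · exact Or.inl ⟨c, hc, h⟩
        · exact Or.inr ⟨c, hc, h⟩

-- ===== VERDICT (by name: the statement is the Claim_ definition above) =====
theorem looks_emotional_py_spec : Claim_equal_looks_emotional_py := by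
  intro text _
  unfold Spec_looks_emotional_py looks_emotional_py looks_emotional_py_alt
  rw [Bool.eq_iff_iff, pvScan_iff]
  have hC : pvCUES = ["sad", "hard", "difficult", "upset", "hurt", "cry",
      "scared", "afraid", "grief", "trauma", "love", "miss"] := by decide
  simp only [List.any_eq_true, PySem.Str.isIn_iff_infix,
    PySem.Chars.exists_prefix_drop_iff_isIn, PySem.Chars.isIn_iff_infix, hC]
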